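-- pv_equiv track=rewrite | github.com/al-osokin/rueo_global | backend/app/parsing/parser_v3/normalization.py | _extract_base_variants
-- ===== SOURCE A (Python) =====
-- from typing import Any, Dict, Iterable, List, Optional, Tuple
--
-- def _extract_base_variants(raw: str, parent_bases: Optional[List[str]], lemma_expansions: List[str]) -> List[str]:
--     bases = parent_bases or [""]
--     raw_no_slash = raw.replace("/", "")
--     if "|" in raw_no_slash:
--         prefix = raw_no_slash.split("|", 1)[0]
--         prefix_expansions = _expand_pattern(prefix)
--         results: List[str] = []
--         for parent in bases:
--             for variant in prefix_expansions:
--                 candidate = variant.replace("~", parent)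
--                 if candidate:
--                     results.append(candidate)
--         return _unique_preserve_order(results)
--     if "~" in raw_no_slash:
--         if parent_bases:
--             return _unique_preserve_order(parent_bases)
--         return lemma_expansions
--     return lemma_expansions
--
-- def _expand_pattern(pattern: str) -> List[str]:
--     cleaned = pattern
--
--     def recurse(index: int) -> Tuple[List[str], int]:
--         results = [""]
--         i = index
--         while i < len(cleaned):
--             char = cleaned[i]
--             if char == '(':
--                 inner, new_index = recurse(i + 1)
--                 updated: List[str] = []
--                 for current in results:
--                     updated.append(current)
--                     for addition in inner:
--                         updated.append(current + addition)
--                 results = updated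
--                 i = new_index
--             elif char == ')':
--                 return results, i + 1
--             else:
--                 j = i
--                 while j < len(cleaned) and cleaned[j] not in '()':
--                     j += 1
--                 literal = cleaned[i:j]
--                 results = [current + literal for current in results]
--                 i = j
--                 continue
--         return results, i
--
--     expanded, _ = recurse(0)
--     return _unique_preserve_order([item for item in expanded if item])
--
-- def _unique_preserve_order(items: Iterable[str]) -> List[str]:
--     seen: set = set()
--     result: List[str] = []
--     for item in items:
--         if item in seen:
--             continue
--         seen.add(item)
--         result.append(item)
--     return result
-- ===== SOURCE B (Python) =====
-- from typing import List, Optional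
--
--
-- def _expand_pattern(pattern: str) -> List[str]:
--     # Iterative parser: explicit stack of saved result-lists instead of recursion.
--     stack: List[List[str]] = []
--     cur = [""]
--     i, n = 0, len(pattern)
--     while i < n:
--         c = pattern[i]
--         if c == '(':
--             stack.append(cur)
--             cur = [""]
--             i += 1
--         elif c == ')':
--             if not stack:
--                 break  # unmatched ')': rest of the pattern is ignored
--             outer = stack.pop()
--             cur = [o + t for o in outer for t in [""] + cur]
--             i += 1
--         else:
--             j = i
--             while j < n and pattern[j] not in '()':
--                 j += 1
--             literal = pattern[i:j]
--             cur = [s + literal for s in cur]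
--             i = j
--     while stack:  # unmatched '(' groups fold up like the recursion's fall-through
--         outer = stack.pop()
--         cur = [o + t for o in outer for t in [""] + cur]
--     return list(dict.fromkeys(item for item in cur if item))
--
--
-- def _extract_base_variants(raw: str, parent_bases: Optional[List[str]], lemma_expansions: List[str]) -> List[str]:
--     s = raw.replace("/", "")
--     if "|" not in s:
--         if "~" in s and parent_bases:
--             return list(dict.fromkeys(parent_bases))
--         return lemma_expansions
--     prefix = s.split("|", 1)[0]
--     variants = _expand_pattern(prefix)
--     out = [v.replace("~", p) for p in (parent_bases or [""]) for v in variants]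
--     return list(dict.fromkeys(c for c in out if c))
-- ===== Notes on version B (the rewrite author's own statement) =====
-- stated objective: alternative
-- what changed: Replaces the recursive bracket-pattern expander (nested recurse returning a continuation index) with an iterative single-pass parser over an explicit stack of result-lists, folding still-open groups at end of input, and uses dict.fromkeys-style ordered dedup and a flatMap-then-filter pipeline instead of seen-set loops with nested append folds.
import Mathlib
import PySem

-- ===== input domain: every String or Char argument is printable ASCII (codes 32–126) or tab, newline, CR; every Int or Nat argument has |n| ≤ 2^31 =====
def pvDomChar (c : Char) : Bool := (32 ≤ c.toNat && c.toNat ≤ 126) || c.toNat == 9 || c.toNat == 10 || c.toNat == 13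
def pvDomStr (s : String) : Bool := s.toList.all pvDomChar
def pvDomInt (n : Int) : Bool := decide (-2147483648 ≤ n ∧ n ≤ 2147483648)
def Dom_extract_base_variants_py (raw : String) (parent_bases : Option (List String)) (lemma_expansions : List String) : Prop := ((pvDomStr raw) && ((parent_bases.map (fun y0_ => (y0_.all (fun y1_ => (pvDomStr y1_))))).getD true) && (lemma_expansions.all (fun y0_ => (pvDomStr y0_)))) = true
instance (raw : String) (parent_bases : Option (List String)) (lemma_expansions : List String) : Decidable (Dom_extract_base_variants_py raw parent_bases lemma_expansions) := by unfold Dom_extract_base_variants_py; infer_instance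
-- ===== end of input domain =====

-- B replaces A's recursive bracket-pattern expander by an iterative parser over an explicit
-- stack of result-lists (objective: alternative — a genuinely different algorithm, same cost).

-- ===== PORT A =====

def pvNotParen (c : Char) : Bool := !(c == '(' || c == ')')

-- the 'updated' loop: keep each current, then each current + each inner addition
def pvCombineA (results inner : List String) : List String :=
  results.flatMap (fun current => current :: inner.map (fun addition => current ++ addition))

-- A's nested `recurse`, over the remaining character list; fuel only makes the
-- recursion structurally total (any fuel ≥ |rest| gives the Python's value).
def pvRecurseA : Nat → List String → List Char → List String × List Char
  | 0, results, rest => (results, rest)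
  | fuel + 1, results, rest =>
    match rest with
    | [] => (results, [])
    | c :: t =>
      if c = '(' then
        let p := pvRecurseA fuel [""] t
        pvRecurseA fuel (pvCombineA results p.1) p.2
      else if c = ')' then (results, t)
      else
        pvRecurseA fuel
          (results.map (fun current => current ++ String.mk (c :: t.takeWhile pvNotParen)))
          (t.dropWhile pvNotParen)

-- _unique_preserve_order: seen-set plus result list
def pvUniqueA (items : List String) : List String :=
  (items.foldl
    (fun (st : PySem.Set String × List String) item =>
      if PySem.Set.contains st.1 item then st else (PySem.Set.add st.1 item, st.2 ++ [item]))
    (PySem.Set.empty, [])).2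

def pvExpandA (pattern : String) : List String :=
  let cleaned := pattern
  let p := pvRecurseA (cleaned.toList.length + 1) [""] cleaned.toList
  pvUniqueA (p.1.filter (fun item => !(item == "")))

def extract_base_variants_py (raw : String) (parent_bases : Option (List String)) (lemma_expansions : List String) : List String :=
  let bases := match parent_bases with
    | none => [""]
    | some l => if l.isEmpty then [""] else l
  let raw_no_slash := PySem.Str.replace raw "/" ""
  if PySem.Str.isIn "|" raw_no_slash then
    let pref := ((PySem.Str.splitMax? raw_no_slash "|" 1).getD []).headD ""
    let prefix_expansions := pvExpandA pref
    let results := bases.foldl (fun acc parent =>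
      prefix_expansions.foldl (fun acc variant =>
        let candidate := PySem.Str.replace variant "~" parent
        if !(candidate == "") then acc ++ [candidate] else acc) acc) []
    pvUniqueA results
  else if PySem.Str.isIn "~" raw_no_slash then
    match parent_bases with
    | none => lemma_expansions
    | some l => if l.isEmpty then lemma_expansions else pvUniqueA l
  else lemma_expansions

-- ===== PORT B =====

-- iterative parser: stack of saved result-lists (head = top of stack)
def pvLoopB : List (List String) → List String → List Char → List (List String) × List String
  | stack, cur, [] => (stack, cur)
  | stack, cur, c :: t =>
    if c = '(' then pvLoopB (cur :: stack) [""] t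
    else if c = ')' then
      match stack with
      | [] => (stack, cur)   -- unmatched ')': rest ignored
      | outer :: rest => pvLoopB rest (outer.flatMap (fun o => ("" :: cur).map (fun tl => o ++ tl))) t
    else
      pvLoopB stack (cur.map (fun s => s ++ String.mk (c :: t.takeWhile pvNotParen))) (t.dropWhile pvNotParen)
termination_by _ _ rest => rest.length
decreasing_by
  · simp
  · simp
  · exact Nat.lt_succ_of_le (List.length_dropWhile_le _ _)

-- fold still-open groups at end of input
def pvFinishB : List (List String) → List String → List String
  | [], cur => cur
  | outer :: rest, cur => pvFinishB rest (outer.flatMap (fun o => ("" :: cur).map (fun tl => o ++ tl)))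

def pvExpandB (pattern : String) : List String :=
  let p := pvLoopB [] [""] pattern.toList
  PySem.List.dedup ((pvFinishB p.1 p.2).filter (fun item => !(item == "")))

def extract_base_variants_py_alt (raw : String) (parent_bases : Option (List String)) (lemma_expansions : List String) : List String :=
  let s := PySem.Str.replace raw "/" ""
  if !(PySem.Str.isIn "|" s) then
    if PySem.Str.isIn "~" s && (match parent_bases with | none => false | some l => !l.isEmpty) then
      PySem.List.dedup (parent_bases.getD [])
    else lemma_expansions
  else
    let pref := ((PySem.Str.splitMax? s "|" 1).getD []).headD ""
    let variants := pvExpandB pref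
    let bases := match parent_bases with
      | none => [""]
      | some l => if l.isEmpty then [""] else l
    let out := bases.flatMap (fun p => variants.map (fun v => PySem.Str.replace v "~" p))
    PySem.List.dedup (out.filter (fun c => !(c == "")))

-- ===== PRECONDITION & SPEC =====
def Spec_extract_base_variants_py (raw : String) (parent_bases : Option (List String)) (lemma_expansions : List String) (out : List String) : Prop := out = extract_base_variants_py_alt raw parent_bases lemma_expansions
instance (raw : String) (parent_bases : Option (List String)) (lemma_expansions : List String) (out : List String) : Decidable (Spec_extract_base_variants_py raw parent_bases lemma_expansions out) := by unfold Spec_extract_base_variants_py; infer_instance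

-- ===== CLAIM (what is proved, stated in full; the proofs are below) =====
def Claim_equal_extract_base_variants_py : Prop := ∀ (raw : String) (parent_bases : Option (List String)) (lemma_expansions : List String), Dom_extract_base_variants_py raw parent_bases lemma_expansions → Spec_extract_base_variants_py raw parent_bases lemma_expansions (extract_base_variants_py raw parent_bases lemma_expansions)

-- ===== LEMMAS AND PROOFS =====

-- one-step unfoldings of B's loop
theorem pvLoopB_nil (stack : List (List String)) (cur : List String) :
    pvLoopB stack cur [] = (stack, cur) := by rw [pvLoopB.eq_def]

theorem pvLoopB_cons (stack : List (List String)) (cur : List String) (c : Char) (t : List Char) :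
    pvLoopB stack cur (c :: t) =
      (if c = '(' then pvLoopB (cur :: stack) [""] t
      else if c = ')' then
        match stack with
        | [] => (stack, cur)
        | outer :: rest => pvLoopB rest (outer.flatMap (fun o => ("" :: cur).map (fun tl => o ++ tl))) t
      else
        pvLoopB stack (cur.map (fun s => s ++ String.mk (c :: t.takeWhile pvNotParen))) (t.dropWhile pvNotParen)) := by
  rw [pvLoopB.eq_def]

-- one-step unfolding of A's recurse (definitional)
theorem pvRecurseA_cons (fuel : Nat) (cur : List String) (c : Char) (t : List Char) :
    pvRecurseA (fuel + 1) cur (c :: t) =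
      (if c = '(' then
        let p := pvRecurseA fuel [""] t
        pvRecurseA fuel (pvCombineA cur p.1) p.2
      else if c = ')' then (cur, t)
      else
        pvRecurseA fuel
          (cur.map (fun current => current ++ String.mk (c :: t.takeWhile pvNotParen)))
          (t.dropWhile pvNotParen)) := rfl

-- B's group combination equals A's
theorem pvComb_eq (outer inner : List String) :
    outer.flatMap (fun o => ("" :: inner).map (fun tl => o ++ tl)) = pvCombineA outer inner := by
  unfold pvCombineA
  apply List.flatMap_congr
  intro o _
  simp

-- the remainder returned by recurse never grows
theorem pvRecurseA_shrink (fuel : Nat) : ∀ (cur : List String) (rest : List Char),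
    (pvRecurseA fuel cur rest).2.length ≤ rest.length := by
  induction fuel with
  | zero => intro cur rest; simp [pvRecurseA]
  | succ n ih =>
    intro cur rest
    match rest with
    | [] => simp [pvRecurseA]
    | c :: t =>
      by_cases h1 : c = '('
      · subst h1
        rw [pvRecurseA_cons]
        simp only [reduceIte]
        calc (pvRecurseA n (pvCombineA cur (pvRecurseA n [""] t).1) (pvRecurseA n [""] t).2).2.length
            ≤ (pvRecurseA n [""] t).2.length := ih _ _
          _ ≤ t.length := ih _ _
          _ ≤ ('(' :: t).length := by simp
      · by_cases h2 : c = ')'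
        · subst h2; rw [pvRecurseA_cons]; simp [h1]
        · rw [pvRecurseA_cons]
          simp only [if_neg h1, if_neg h2]
          calc (pvRecurseA n (cur.map _) (t.dropWhile pvNotParen)).2.length
              ≤ (t.dropWhile pvNotParen).length := ih _ _
            _ ≤ t.length := List.length_dropWhile_le _ _
            _ ≤ (c :: t).length := by simp

-- with enough fuel, one extra unit of fuel does not change the result
theorem pvRecurseA_succ (fuel : Nat) : ∀ (rest : List Char) (cur : List String),
    rest.length ≤ fuel → pvRecurseA fuel cur rest = pvRecurseA (fuel + 1) cur rest := by
  induction fuel with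
  | zero =>
    intro rest cur h
    have : rest = [] := List.eq_nil_of_length_eq_zero (Nat.le_zero.mp h)
    subst this
    simp [pvRecurseA]
  | succ n ih =>
    intro rest cur h
    match rest with
    | [] => simp [pvRecurseA]
    | c :: t =>
      have ht : t.length ≤ n := by simpa using h
      by_cases h1 : c = '('
      · subst h1
        rw [pvRecurseA_cons, pvRecurseA_cons]
        simp only [reduceIte]
        rw [← ih t [""] ht]
        have h2 : (pvRecurseA n [""] t).2.length ≤ n :=
          le_trans (pvRecurseA_shrink n [""] t) ht
        rw [← ih _ _ h2]
      · by_cases h2 : c = ')'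
        · subst h2; rw [pvRecurseA_cons, pvRecurseA_cons]; simp [h1]
        · rw [pvRecurseA_cons, pvRecurseA_cons]
          simp only [if_neg h1, if_neg h2]
          exact ih _ _ (le_trans (List.length_dropWhile_le _ _) ht)

theorem pvRecurseA_add (k fuel : Nat) (rest : List Char) (cur : List String)
    (h : rest.length ≤ fuel) : pvRecurseA fuel cur rest = pvRecurseA (fuel + k) cur rest := by
  induction k with
  | zero => rfl
  | succ m ih =>
    rw [ih]
    exact pvRecurseA_succ (fuel + m) rest cur (le_trans h (Nat.le_add_right _ _))

theorem pvRecurseA_irrel (fuel₁ fuel₂ : Nat) (rest : List Char) (cur : List String)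
    (h1 : rest.length ≤ fuel₁) (h2 : rest.length ≤ fuel₂) :
    pvRecurseA fuel₁ cur rest = pvRecurseA fuel₂ cur rest := by
  obtain ⟨k1, hk1⟩ := Nat.le.dest h1
  obtain ⟨k2, hk2⟩ := Nat.le.dest h2
  rw [← hk1, ← hk2, ← pvRecurseA_add k1 rest.length rest cur le_rfl,
      ← pvRecurseA_add k2 rest.length rest cur le_rfl]

-- the fuel-free recursion (A's recurse with always-sufficient fuel)
def pvRec (cur : List String) (rest : List Char) : List String × List Char :=
  pvRecurseA rest.length cur rest

theorem pvRec_eq_fuel (fuel : Nat) (rest : List Char) (cur : List String)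
    (h : rest.length ≤ fuel) : pvRecurseA fuel cur rest = pvRec cur rest :=
  pvRecurseA_irrel fuel rest.length rest cur h le_rfl

theorem pvRec_shrink (cur : List String) (rest : List Char) :
    (pvRec cur rest).2.length ≤ rest.length := pvRecurseA_shrink _ _ _

theorem pvRec_nil (cur : List String) : pvRec cur [] = (cur, []) := rfl

theorem pvRec_paren (cur : List String) (t : List Char) :
    pvRec cur ('(' :: t) = pvRec (pvCombineA cur (pvRec [""] t).1) (pvRec [""] t).2 := by
  show pvRecurseA (t.length + 1) cur ('(' :: t) = _
  rw [pvRecurseA_cons]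
  simp only [reduceIte]
  rw [pvRec_eq_fuel t.length t [""] le_rfl,
      pvRec_eq_fuel t.length _ _ (pvRec_shrink [""] t)]

theorem pvRec_close (cur : List String) (t : List Char) :
    pvRec cur (')' :: t) = (cur, t) := by
  show pvRecurseA (t.length + 1) cur (')' :: t) = _
  rw [pvRecurseA_cons]
  simp

theorem pvRec_lit (cur : List String) (c : Char) (t : List Char)
    (h1 : c ≠ '(') (h2 : c ≠ ')') :
    pvRec cur (c :: t) =
      pvRec (cur.map (fun s => s ++ String.mk (c :: t.takeWhile pvNotParen))) (t.dropWhile pvNotParen) := by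
  show pvRecurseA (t.length + 1) cur (c :: t) = _
  rw [pvRecurseA_cons]
  simp only [if_neg h1, if_neg h2]
  exact pvRec_eq_fuel t.length _ _ (List.length_dropWhile_le _ _)

-- what A computes after returning to each saved caller in turn
def pvContA : List (List String) → List String → List Char → List String
  | [], res, _ => res
  | outer :: s, res, rest =>
      let p := pvRec (pvCombineA outer res) rest
      pvContA s p.1 p.2

theorem pvContA_nil (stack : List (List String)) : ∀ (cur : List String),
    pvContA stack cur [] = pvFinishB stack cur := by
  induction stack with
  | nil => intro cur; rfl
  | cons outer s ih =>
    intro cur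
    show pvContA s (pvRec (pvCombineA outer cur) []).1 (pvRec (pvCombineA outer cur) []).2
        = pvFinishB (outer :: s) cur
    rw [pvRec_nil]
    show pvContA s (pvCombineA outer cur) [] = _
    rw [ih, pvFinishB, pvComb_eq]

-- MAIN: the stack machine computes exactly A's recursion-with-continuations
theorem pvMain (n : Nat) : ∀ (rest : List Char), rest.length ≤ n →
    ∀ (stack : List (List String)) (cur : List String),
    pvFinishB (pvLoopB stack cur rest).1 (pvLoopB stack cur rest).2
      = pvContA stack (pvRec cur rest).1 (pvRec cur rest).2 := by
  induction n with
  | zero =>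
    intro rest h stack cur
    have : rest = [] := List.eq_nil_of_length_eq_zero (Nat.le_zero.mp h)
    subst this
    rw [pvRec_nil, pvLoopB_nil, pvContA_nil]
  | succ n ih =>
    intro rest h stack cur
    match rest with
    | [] => rw [pvRec_nil, pvLoopB_nil, pvContA_nil]
    | c :: t =>
      have ht : t.length ≤ n := by simpa using h
      by_cases h1 : c = '('
      · subst h1
        rw [pvLoopB_cons]
        simp only [if_true]
        rw [pvRec_paren]
        exact ih t ht (cur :: stack) [""]
      · by_cases h2 : c = ')'
        · subst h2
          rw [pvLoopB_cons]
          simp only [reduceIte]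
          rw [pvRec_close]
          match stack with
          | [] => rfl
          | outer :: s =>
            show pvFinishB (pvLoopB s (outer.flatMap (fun o => ("" :: cur).map (fun tl => o ++ tl))) t).1
                (pvLoopB s (outer.flatMap (fun o => ("" :: cur).map (fun tl => o ++ tl))) t).2
              = pvContA (outer :: s) cur t
            rw [pvComb_eq]
            exact ih t ht s (pvCombineA outer cur)
        · rw [pvLoopB_cons]
          simp only [if_neg h1, if_neg h2]
          rw [pvRec_lit cur c t h1 h2]
          exact ih (t.dropWhile pvNotParen) (le_trans (List.length_dropWhile_le _ _) ht) stack _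

-- A's dedup (seen-set + result list) is dict.fromkeys-style ordered dedup
theorem pvUniqueA_eq (l : List String) : pvUniqueA l = PySem.List.dedup l := by
  have key : ∀ (l : List String) (s : PySem.Set String),
      l.foldl (fun (st : PySem.Set String × List String) item =>
        if PySem.Set.contains st.1 item then st else (PySem.Set.add st.1 item, st.2 ++ [item]))
        (s, s)
      = (l.foldl PySem.Set.add s, l.foldl PySem.Set.add s) := by
    intro l
    induction l with
    | nil => intro s; rfl
    | cons x t ih =>
      intro s
      simp only [List.foldl]
      by_cases hx : x ∈ s
      · have h1 : (if PySem.Set.contains s x then (s, s)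
            else (PySem.Set.add s x, s ++ [x])) = (s, s) := by simp [hx]
        have h2 : PySem.Set.add s x = s := by simp [PySem.Set.add, hx]
        rw [h1, h2]
        exact ih s
      · have h1 : (if PySem.Set.contains s x then (s, s)
            else (PySem.Set.add s x, s ++ [x])) = (s ++ [x], s ++ [x]) := by
          simp [PySem.Set.add, hx]
        have h2 : PySem.Set.add s x = s ++ [x] := by simp [PySem.Set.add, hx]
        rw [h1, h2]
        exact ih (s ++ [x])
  unfold pvUniqueA
  have h0 : ((PySem.Set.empty : PySem.Set String), ([] : List String))
      = ((PySem.Set.empty : PySem.Set String), (PySem.Set.empty : PySem.Set String)) := rfl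
  rw [h0, key, PySem.List.dedup_eq_ofList, PySem.Set.ofList_eq_foldl]
  rfl

-- filter commutes with flatMap
theorem pvFilter_flatMap {α β : Type} (l : List α) (g : α → List β) (p : β → Bool) :
    (l.flatMap g).filter p = l.flatMap (fun x => (g x).filter p) := by
  induction l with
  | nil => rfl
  | cons x t ih => simp [List.flatMap_cons, List.filter_append, ih]

-- the two expanders agree
theorem pvExpand_eq (pattern : String) : pvExpandA pattern = pvExpandB pattern := by
  unfold pvExpandA pvExpandB
  rw [pvUniqueA_eq]
  have hmain := pvMain pattern.toList.length pattern.toList le_rfl [] [""]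
  simp only [pvContA] at hmain
  show PySem.List.dedup
      ((pvRecurseA (pattern.toList.length + 1) [""] pattern.toList).1.filter (fun item => !(item == "")))
    = PySem.List.dedup
      ((pvFinishB (pvLoopB [] [""] pattern.toList).1 (pvLoopB [] [""] pattern.toList).2).filter
        (fun item => !(item == "")))
  rw [pvRec_eq_fuel (pattern.toList.length + 1) pattern.toList [""] (Nat.le_succ _), ← hmain]

-- ===== VERDICT (by name: the statement is the Claim_ definition above) =====
theorem extract_base_variants_py_spec : Claim_equal_extract_base_variants_py := by
  intro raw parent_bases lemma_expansions _
  show extract_base_variants_py raw parent_bases lemma_expansions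
      = extract_base_variants_py_alt raw parent_bases lemma_expansions
  unfold extract_base_variants_py extract_base_variants_py_alt
  by_cases hpipe : PySem.Str.isIn "|" (PySem.Str.replace raw "/" "") = true
  · simp only [hpipe, Bool.not_true, Bool.false_eq_true, if_false, if_true]
    rw [pvUniqueA_eq, ← pvExpand_eq]
    congr 1
    have hinner : ∀ (exps : List String) (parent : String) (acc : List String),
        exps.foldl (fun acc variant =>
          let candidate := PySem.Str.replace variant "~" parent
          if !(candidate == "") then acc ++ [candidate] else acc) acc
        = acc ++ (exps.map (fun v => PySem.Str.replace v "~" parent)).filter (fun c => !(c == "")) := by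
      intro exps parent acc
      rw [PySem.List.foldl_append_if (fun v => !(PySem.Str.replace v "~" parent == ""))
            (fun v => PySem.Str.replace v "~" parent) exps acc]
      rw [List.filter_map]
      rfl
    have houter : ∀ (bases : List String),
        bases.foldl (fun acc parent =>
          (pvExpandA (((PySem.Str.splitMax? (PySem.Str.replace raw "/" "") "|" 1).getD []).headD "")).foldl
            (fun acc variant =>
              let candidate := PySem.Str.replace variant "~" parent
              if !(candidate == "") then acc ++ [candidate] else acc) acc) []
        = ((bases.flatMap (fun p =>
            (pvExpandA (((PySem.Str.splitMax? (PySem.Str.replace raw "/" "") "|" 1).getD []).headD "")).map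
              (fun v => PySem.Str.replace v "~" p))).filter (fun c => !(c == ""))) := by
      intro bases
      have := PySem.List.foldl_append_eq_flatMap (fun parent =>
        ((pvExpandA (((PySem.Str.splitMax? (PySem.Str.replace raw "/" "") "|" 1).getD []).headD "")).map
          (fun v => PySem.Str.replace v "~" parent)).filter (fun c => !(c == ""))) bases []
      simp only [List.nil_append] at this
      rw [pvFilter_flatMap, ← this]
      have hfun : (fun (acc : List String) parent =>
          (pvExpandA (((PySem.Str.splitMax? (PySem.Str.replace raw "/" "") "|" 1).getD []).headD "")).foldl
            (fun acc variant =>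
              let candidate := PySem.Str.replace variant "~" parent
              if !(candidate == "") then acc ++ [candidate] else acc) acc)
          = (fun (acc : List String) parent => acc ++
            ((pvExpandA (((PySem.Str.splitMax? (PySem.Str.replace raw "/" "") "|" 1).getD []).headD "")).map
              (fun v => PySem.Str.replace v "~" parent)).filter (fun c => !(c == ""))) := by
        funext acc parent
        exact hinner _ _ _
      rw [hfun]
    rw [houter]
  · have hpipe' : PySem.Str.isIn "|" (PySem.Str.replace raw "/" "") = false := by
      simpa using hpipe
    simp only [hpipe', Bool.false_eq_true, if_false, Bool.not_false, if_true]
    match parent_bases with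
    | none =>
      by_cases htil : PySem.Str.isIn "~" (PySem.Str.replace raw "/" "") = true <;> simp
    | some l =>
      by_cases htil : PySem.Str.isIn "~" (PySem.Str.replace raw "/" "") = true
      · by_cases hl : l.isEmpty = true
        · simp [hl]
        · simp only [Bool.not_eq_true] at hl
          simp [hl, pvUniqueA_eq]
      · simp only [Bool.not_eq_true] at htil
        by_cases hl : l.isEmpty = true <;> simp [hl, pvUniqueA_eq]
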